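-- pv_equiv track=rewrite | github.com/NCAR/AITuning | accuracy/accuracy_DQN_parabola_Q_learning.py | check_reward
-- ===== SOURCE A (Python) =====
-- def check_reward(performance_vars, new_perf_vars):
--     reward = 0
--     for i in range(len(performance_vars)):
--         if(performance_vars[i] > new_perf_vars[i]):
--             reward = reward + 20
--         elif(performance_vars[i] < new_perf_vars[i]):
--             reward = reward - 50
--         if(performance_vars[i] == new_perf_vars[i]):
--             reward = reward - 1
--     return reward
-- ===== SOURCE B (Python) =====
-- def check_reward(performance_vars, new_perf_vars):
--     n = len(performance_vars)
--     g = sum(1 for i in range(n) if performance_vars[i] > new_perf_vars[i])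
--     l = sum(1 for i in range(n) if performance_vars[i] < new_perf_vars[i])
--     e = n - g - l
--     return 20 * g - 50 * l - e
-- ===== Notes on version B (the rewrite author's own statement) =====
-- stated objective: alternative
-- what changed: Replaces the single accumulator loop by three tallies (greater/less/equal counts, the equal count obtained by the closed form n-g-l) combined with the closed form 20*g-50*l-e.
import Mathlib
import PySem

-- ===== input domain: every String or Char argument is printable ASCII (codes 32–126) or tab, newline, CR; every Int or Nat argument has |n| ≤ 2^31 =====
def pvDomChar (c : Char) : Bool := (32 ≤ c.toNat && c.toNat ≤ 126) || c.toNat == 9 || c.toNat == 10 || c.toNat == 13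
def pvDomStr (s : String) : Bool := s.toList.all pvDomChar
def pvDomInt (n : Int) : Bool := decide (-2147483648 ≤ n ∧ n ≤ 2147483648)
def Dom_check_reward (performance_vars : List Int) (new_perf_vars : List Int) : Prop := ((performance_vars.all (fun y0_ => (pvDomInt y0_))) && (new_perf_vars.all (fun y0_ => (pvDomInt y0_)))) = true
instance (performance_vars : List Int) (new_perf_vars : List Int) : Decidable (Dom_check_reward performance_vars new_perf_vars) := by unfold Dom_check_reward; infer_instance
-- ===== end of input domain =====

-- B replaces A's single accumulator loop by three tallies (greater/less/equal, the last via the closed form n-g-l) combined arithmetically.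

-- ===== PORT A =====
def check_reward (performance_vars : List Int) (new_perf_vars : List Int) : Int :=
  (PySem.List.pyRange 0 performance_vars.length 1).foldl
    (fun reward i =>
      let a := PySem.List.pyGetD performance_vars i 0
      let b := PySem.List.pyGetD new_perf_vars i 0
      let reward := if a > b then reward + 20 else if a < b then reward - 50 else reward
      if a = b then reward - 1 else reward)
    0

-- ===== PORT B =====
def check_reward_alt (performance_vars : List Int) (new_perf_vars : List Int) : Int :=
  let n := performance_vars.length
  let g := ((PySem.List.pyRange 0 n 1).countP
    (fun i => PySem.List.pyGetD performance_vars i 0 > PySem.List.pyGetD new_perf_vars i 0) : Int)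
  let l := ((PySem.List.pyRange 0 n 1).countP
    (fun i => PySem.List.pyGetD performance_vars i 0 < PySem.List.pyGetD new_perf_vars i 0) : Int)
  let e := (n : Int) - g - l
  20 * g - 50 * l - e

-- ===== PRECONDITION & SPEC =====
-- A (and B) raise IndexError when new_perf_vars is shorter than performance_vars; Pre_ excludes exactly that.
def Pre_check_reward (performance_vars : List Int) (new_perf_vars : List Int) : Prop :=
  performance_vars.length ≤ new_perf_vars.length
instance (performance_vars : List Int) (new_perf_vars : List Int) : Decidable (Pre_check_reward performance_vars new_perf_vars) := by unfold Pre_check_reward; infer_instance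
def pvWitness_check_reward : List Int × List Int := ([3, 1, 2], [1, 1, 5])
def Spec_check_reward (performance_vars : List Int) (new_perf_vars : List Int) (out : Int) : Prop := out = check_reward_alt performance_vars new_perf_vars
instance (performance_vars : List Int) (new_perf_vars : List Int) (out : Int) : Decidable (Spec_check_reward performance_vars new_perf_vars out) := by unfold Spec_check_reward; infer_instance

-- ===== CLAIM (what is proved, stated in full; the proofs are below) =====
def Claim_equal_check_reward : Prop := ∀ (performance_vars : List Int) (new_perf_vars : List Int), Dom_check_reward performance_vars new_perf_vars → Pre_check_reward performance_vars new_perf_vars → Spec_check_reward performance_vars new_perf_vars (check_reward performance_vars new_perf_vars)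

-- ===== LEMMAS AND PROOFS =====

-- A's loop body over an arbitrary index list equals the counted closed form.
theorem check_reward_foldl_eq (pv nv : List Int) (is : List Int) (r : Int) :
    is.foldl
      (fun reward i =>
        let a := PySem.List.pyGetD pv i 0
        let b := PySem.List.pyGetD nv i 0
        let reward := if a > b then reward + 20 else if a < b then reward - 50 else reward
        if a = b then reward - 1 else reward) r
    = r + 20 * (is.countP (fun i => PySem.List.pyGetD pv i 0 > PySem.List.pyGetD nv i 0) : Int)
        - 50 * (is.countP (fun i => PySem.List.pyGetD pv i 0 < PySem.List.pyGetD nv i 0) : Int)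
        - ((is.length : Int)
            - (is.countP (fun i => PySem.List.pyGetD pv i 0 > PySem.List.pyGetD nv i 0) : Int)
            - (is.countP (fun i => PySem.List.pyGetD pv i 0 < PySem.List.pyGetD nv i 0) : Int)) := by
  induction is generalizing r with
  | nil => simp
  | cons j js ih =>
    simp only [List.foldl_cons, List.countP_cons, List.length_cons]
    rw [ih]
    rcases lt_trichotomy (PySem.List.pyGetD pv j 0) (PySem.List.pyGetD nv j 0) with h | h | h
    · have h1 : ¬ (PySem.List.pyGetD pv j 0 > PySem.List.pyGetD nv j 0) := by omega
      have h2 : PySem.List.pyGetD pv j 0 ≠ PySem.List.pyGetD nv j 0 := by omega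
      simp [h, h1, h2]
      ring
    · simp [h]
      ring
    · have h1 : ¬ (PySem.List.pyGetD pv j 0 < PySem.List.pyGetD nv j 0) := by omega
      have h2 : PySem.List.pyGetD pv j 0 ≠ PySem.List.pyGetD nv j 0 := by omega
      simp [h, h1, h2]
      ring

-- ===== VERDICT (by name: the statement is the Claim_ definition above) =====
theorem check_reward_spec : Claim_equal_check_reward := by
  intro pv nv _ _
  unfold Spec_check_reward check_reward check_reward_alt
  rw [check_reward_foldl_eq]
  simp [PySem.List.length_pyRange_one]
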